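-- pv_equiv track=rewrite | github.com/andyy-liu/ICS4U | strings/check in.py | f
-- ===== SOURCE A (Python) =====
-- def f(x):
--     if x < 1:
--         return False
--     else:
--         count = 0
--         for divider in range(1, x):
--             if x % divider == 0:
--                 count += 1
--
--         if count == 4:
--             return True
--         else:
--             return False
-- ===== SOURCE B (Python) =====
-- def f(x):
--     if x < 1:
--         return False
--     small = 0
--     has_sq_root = False
--     d = 1
--     while d * d <= x:
--         if x % d == 0:
--             small += 1
--             if d * d == x:
--                 has_sq_root = True
--         d += 1
--     total = 2 * small - (1 if has_sq_root else 0)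
--     return total == 5
-- ===== Notes on version B (the rewrite author's own statement) =====
-- stated objective: faster
-- what changed: Instead of scanning every candidate below x, B trial-divides only up to the square root of x, counting each small divisor and inferring its large cofactor, so the total divisor count is twice the small-divisor count minus a perfect-square correction; it returns whether that total is five (i.e. four proper divisors).
import Mathlib
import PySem

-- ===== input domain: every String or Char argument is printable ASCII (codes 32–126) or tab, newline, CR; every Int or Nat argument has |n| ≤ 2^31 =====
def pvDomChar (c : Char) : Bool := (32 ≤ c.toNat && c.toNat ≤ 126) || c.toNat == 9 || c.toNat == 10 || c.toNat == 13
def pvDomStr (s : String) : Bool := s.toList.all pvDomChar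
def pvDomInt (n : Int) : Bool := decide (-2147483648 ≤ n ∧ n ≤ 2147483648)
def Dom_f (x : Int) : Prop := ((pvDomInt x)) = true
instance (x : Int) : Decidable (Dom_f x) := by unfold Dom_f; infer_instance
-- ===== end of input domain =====

-- B replaces A's linear scan of range(1, x) by trial division up to sqrt(x): each small
-- divisor pairs with a large cofactor, so the total divisor count is 2*small minus a
-- perfect-square correction, and "4 proper divisors" becomes "total == 5" (objective: faster).

-- ===== PORT A =====
def f (x : Int) : Bool :=
  if x < 1 then false
  else
    let count : Int := (PySem.List.pyRange 1 x 1).foldl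
      (fun count divider => if PySem.Int.mod x divider == 0 then count + 1 else count) 0
    if count == 4 then true else false

-- ===== PORT B =====
-- the while loop of Source B: returns the final (small, has_sq_root)
def fAltLoop (x d small : Int) (hasSq : Bool) : Int × Bool :=
  if _h : d * d ≤ x then
    let p : Int × Bool :=
      if PySem.Int.mod x d == 0 then
        (small + 1, if d * d == x then true else hasSq)
      else (small, hasSq)
    fAltLoop x (d + 1) p.1 p.2
  else (small, hasSq)
termination_by (x + 1 - d).toNat
decreasing_by
  have hdx : d ≤ x := by
    by_cases h : d ≤ 0
    · nlinarith
    · nlinarith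
  omega

def f_alt (x : Int) : Bool :=
  if x < 1 then false
  else
    let r := fAltLoop x 1 0 false
    let total : Int := 2 * r.1 - (if r.2 then 1 else 0)
    total == 5

-- ===== PRECONDITION & SPEC =====
def Spec_f (x : Int) (out : Bool) : Prop := out = f_alt x
instance (x : Int) (out : Bool) : Decidable (Spec_f x out) := by unfold Spec_f; infer_instance

-- ===== CLAIM (what is proved, stated in full; the proofs are below) =====
def Claim_equal_f : Prop := ∀ (x : Int), Dom_f x → Spec_f x (f x)

-- ===== LEMMAS AND PROOFS =====

-- A's loop counts the divisors of n in [1, m)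
lemma a_loop_count (n : ℕ) (m : ℕ) (c : Int) :
    (PySem.List.pyRange 1 (m : Int) 1).foldl
      (fun count divider => if PySem.Int.mod (n : Int) divider == 0 then count + 1 else count) c
    = c + ((Finset.Ico 1 m).filter (· ∣ n)).card := by
  induction m with
  | zero =>
    rw [PySem.List.pyRange_one_eq_nil (by norm_num)]
    simp
  | succ m ih =>
    rcases Nat.eq_zero_or_pos m with hm | hm
    · subst hm
      rw [PySem.List.pyRange_one_eq_nil (by norm_num)]
      simp
    · have hcast : ((m + 1 : ℕ) : Int) = (m : Int) + 1 := by push_cast; ring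
      rw [hcast, PySem.List.pyRange_one_succ_right (by exact_mod_cast hm), List.foldl_append, ih]
      have hIco : Finset.Ico 1 (m + 1) = insert m (Finset.Ico 1 m) := by
        ext j; simp only [Finset.mem_Ico, Finset.mem_insert]; omega
      rw [hIco, Finset.filter_insert]
      by_cases hd : m ∣ n
      · have hmod : (PySem.Int.mod (n : Int) (m : Int) == 0) = true := by
          rw [beq_iff_eq, PySem.Int.mod_eq_zero_iff_dvd]; exact_mod_cast hd
        simp only [List.foldl_cons, List.foldl_nil, hmod, if_pos hd, if_true]
        rw [Finset.card_insert_of_notMem (by simp)]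
        push_cast; ring
      · have hmod : (PySem.Int.mod (n : Int) (m : Int) == 0) = false := by
          simp only [beq_eq_false_iff_ne, ne_eq, PySem.Int.mod_eq_zero_iff_dvd]
          exact fun h => hd (by exact_mod_cast h)
        simp only [List.foldl_cons, List.foldl_nil, hmod, if_neg hd, Bool.false_eq_true,
          if_false]

-- B's loop counts divisors of n in [d, sqrt n] and detects a square root ≥ d
lemma b_loop_count (n : ℕ) :
    ∀ (k d : ℕ), n.sqrt + 1 - d = k → 1 ≤ d → ∀ (s : Int) (b : Bool),
      fAltLoop (n : Int) (d : Int) s b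
      = (s + ((Finset.Icc d n.sqrt).filter (· ∣ n)).card,
         b || decide (d ≤ n.sqrt ∧ n.sqrt * n.sqrt = n)) := by
  intro k
  induction k with
  | zero =>
    intro d hk hd s b
    have hgt : n.sqrt < d := by omega
    have hguard : ¬ ((d : Int) * (d : Int) ≤ (n : Int)) := by
      have : n < d * d := Nat.sqrt_lt.mp hgt
      omega
    rw [fAltLoop, dif_neg hguard]
    have hIcc : Finset.Icc d n.sqrt = ∅ := Finset.Icc_eq_empty (by omega)
    have hdec : decide (d ≤ n.sqrt ∧ n.sqrt * n.sqrt = n) = false := by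
      simp; omega
    rw [hIcc, hdec]
    simp
  | succ k ih =>
    intro d hk hd s b
    have hle : d ≤ n.sqrt := by omega
    have hdd : d * d ≤ n := Nat.le_sqrt.mp hle
    have hguard : (d : Int) * (d : Int) ≤ (n : Int) := by omega
    rw [fAltLoop, dif_pos hguard]
    have hIcc : Finset.Icc d n.sqrt = insert d (Finset.Icc (d + 1) n.sqrt) := by
      ext j; simp [Finset.mem_Icc, Finset.mem_insert]; omega
    have ih' := fun s b => ih (d + 1) (by omega) (by omega) s b
    have hcast : ((d + 1 : ℕ) : Int) = (d : Int) + 1 := by push_cast; ring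
    rw [← hcast]
    by_cases hdvd : d ∣ n
    · have hmod : (PySem.Int.mod (n : Int) (d : Int) == 0) = true := by
        rw [beq_iff_eq, PySem.Int.mod_eq_zero_iff_dvd]; exact_mod_cast hdvd
      simp only [hmod, if_true]
      by_cases hsq : d * d = n
      · have hds : n.sqrt = d := by rw [← hsq, Nat.sqrt_eq]
        have heq : ((d : Int) * (d : Int) == (n : Int)) = true := by
          simp; exact_mod_cast hsq
        simp only [heq, if_true]
        rw [ih']
        have hdec : decide (d ≤ n.sqrt ∧ n.sqrt * n.sqrt = n) = true := by
          simp [hds, hsq]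
        rw [hIcc, Finset.filter_insert, if_pos hdvd,
          Finset.card_insert_of_notMem (by simp), hdec]
        simp only [Bool.true_or, Bool.or_true]
        rw [Prod.mk.injEq]
        refine ⟨by push_cast; ring, rfl⟩
      · have heq : ((d : Int) * (d : Int) == (n : Int)) = false := by
          simp; exact fun h => hsq (by exact_mod_cast h)
        simp only [heq, Bool.false_eq_true, if_false]
        rw [ih']
        have hdec : decide (d + 1 ≤ n.sqrt ∧ n.sqrt * n.sqrt = n)
            = decide (d ≤ n.sqrt ∧ n.sqrt * n.sqrt = n) := by
          rcases Nat.eq_or_lt_of_le hle with he | hlt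
          · have : ¬ (n.sqrt * n.sqrt = n) := by rw [← he]; exact hsq
            simp [this]
          · have h1 : d + 1 ≤ n.sqrt := by omega
            simp [h1, hle]
        rw [hIcc, Finset.filter_insert, if_pos hdvd,
          Finset.card_insert_of_notMem (by simp), hdec]
        rw [Prod.mk.injEq]
        refine ⟨by push_cast; ring, rfl⟩
    · have hmod : (PySem.Int.mod (n : Int) (d : Int) == 0) = false := by
        simp only [beq_eq_false_iff_ne, ne_eq, PySem.Int.mod_eq_zero_iff_dvd]
        exact fun h => hdvd (by exact_mod_cast h)
      simp only [hmod, Bool.false_eq_true, if_false]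
      rw [ih']
      have hdec : decide (d + 1 ≤ n.sqrt ∧ n.sqrt * n.sqrt = n)
          = decide (d ≤ n.sqrt ∧ n.sqrt * n.sqrt = n) := by
        rcases Nat.eq_or_lt_of_le hle with he | hlt
        · have : ¬ (n.sqrt * n.sqrt = n) := by
            rw [← he]; exact fun h => hdvd ⟨d, h.symm⟩
          simp [this]
        · have h1 : d + 1 ≤ n.sqrt := by omega
          simp [h1, hle]
      rw [hIcc, Finset.filter_insert, if_neg hdvd, hdec]

lemma card_large_eq_card_small (n : ℕ) (hn : 1 ≤ n) :
    (n.divisors.filter (fun k => n < k * k)).card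
    = (n.divisors.filter (fun k => k * k < n)).card := by
  apply Finset.card_nbij' (fun k => n / k) (fun k => n / k)
  · intro k hk
    simp only [Nat.mem_divisors, Finset.coe_filter, Set.mem_setOf_eq] at hk ⊢
    obtain ⟨⟨hdvd, hne⟩, hlt⟩ := hk
    obtain ⟨e, he⟩ := hdvd
    have hk0 : 0 < k := Nat.pos_of_dvd_of_pos ⟨e, he⟩ (by omega)
    have hdiv : n / k = e := by rw [he, Nat.mul_div_cancel_left e hk0]
    have he0 : 0 < e := by
      rcases Nat.eq_zero_or_pos e with h | h
      · subst h; omega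
      · exact h
    have hek : e < k := by nlinarith
    refine ⟨⟨Nat.div_dvd_of_dvd ⟨e, he⟩, hne⟩, ?_⟩
    rw [hdiv]; nlinarith
  · intro k hk
    simp only [Nat.mem_divisors, Finset.coe_filter, Set.mem_setOf_eq] at hk ⊢
    obtain ⟨⟨hdvd, hne⟩, hlt⟩ := hk
    obtain ⟨e, he⟩ := hdvd
    have hk0 : 0 < k := Nat.pos_of_dvd_of_pos ⟨e, he⟩ (by omega)
    have hdiv : n / k = e := by rw [he, Nat.mul_div_cancel_left e hk0]
    have he0 : 0 < e := by
      rcases Nat.eq_zero_or_pos e with h | h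
      · subst h; omega
      · exact h
    have hek : k < e := by nlinarith
    refine ⟨⟨Nat.div_dvd_of_dvd ⟨e, he⟩, hne⟩, ?_⟩
    rw [hdiv]; nlinarith
  · intro k hk
    simp only [Finset.coe_filter, Set.mem_setOf_eq, Nat.mem_divisors] at hk
    exact Nat.div_div_self hk.1.1 (by omega)
  · intro k hk
    simp only [Finset.coe_filter, Set.mem_setOf_eq, Nat.mem_divisors] at hk
    exact Nat.div_div_self hk.1.1 (by omega)

lemma core_count (n : ℕ) (hn : 1 ≤ n) :
    2 * ((Finset.Icc 1 n.sqrt).filter (· ∣ n)).card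
    = ((Finset.Ico 1 n).filter (· ∣ n)).card + 1
      + (if n.sqrt * n.sqrt = n then 1 else 0) := by
  have hne : n ≠ 0 := by omega
  -- rewrite both counting sets as filters of n.divisors
  have h1 : (Finset.Icc 1 n.sqrt).filter (· ∣ n)
      = n.divisors.filter (fun k => k * k ≤ n) := by
    ext k
    simp only [Finset.mem_filter, Finset.mem_Icc, Nat.mem_divisors]
    constructor
    · rintro ⟨⟨h1k, h2k⟩, hdvd⟩
      exact ⟨⟨hdvd, hne⟩, Nat.le_sqrt.mp h2k⟩
    · rintro ⟨⟨hdvd, _⟩, hkk⟩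
      exact ⟨⟨Nat.pos_of_dvd_of_pos hdvd (by omega), Nat.le_sqrt.mpr hkk⟩, hdvd⟩
  have h2 : (Finset.Ico 1 n).filter (· ∣ n) = n.divisors.erase n := by
    ext k
    simp only [Finset.mem_filter, Finset.mem_Ico, Finset.mem_erase, Nat.mem_divisors, ne_eq]
    constructor
    · rintro ⟨⟨h1k, h2k⟩, hdvd⟩
      exact ⟨by omega, hdvd, hne⟩
    · rintro ⟨hk, hdvd, _⟩
      have := Nat.le_of_dvd (by omega) hdvd
      exact ⟨⟨Nat.pos_of_dvd_of_pos hdvd (by omega), by omega⟩, hdvd⟩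
  have h2c : ((Finset.Ico 1 n).filter (· ∣ n)).card = n.divisors.card - 1 := by
    rw [h2, Finset.card_erase_of_mem (Nat.mem_divisors_self n hne)]
  have hsplit : (n.divisors.filter (fun k => k * k ≤ n)).card
      + (n.divisors.filter (fun k => n < k * k)).card = n.divisors.card := by
    have h := Finset.card_filter_add_card_filter_not (fun k => k * k ≤ n) (s := n.divisors)
    simpa [Nat.not_le] using h
  have hsplit2 : (n.divisors.filter (fun k => k * k < n)).card
      + (n.divisors.filter (fun k => k * k = n)).card
      = (n.divisors.filter (fun k => k * k ≤ n)).card := by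
    have h := Finset.card_filter_add_card_filter_not (fun k => k * k < n)
      (s := n.divisors.filter (fun k => k * k ≤ n))
    rw [Finset.filter_filter, Finset.filter_filter] at h
    have e1 : n.divisors.filter (fun k => k * k ≤ n ∧ k * k < n)
        = n.divisors.filter (fun k => k * k < n) := by
      apply Finset.filter_congr; intro k _; constructor <;> intro h' <;> [exact h'.2; omega]
    have e2 : n.divisors.filter (fun k => k * k ≤ n ∧ ¬ k * k < n)
        = n.divisors.filter (fun k => k * k = n) := by
      apply Finset.filter_congr; intro k _; constructor <;> intro h' <;> omega
    rw [e1, e2] at h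
    exact h
  have hEq : (n.divisors.filter (fun k => k * k = n)).card
      = (if n.sqrt * n.sqrt = n then 1 else 0) := by
    by_cases hs : n.sqrt * n.sqrt = n
    · rw [if_pos hs]
      have : n.divisors.filter (fun k => k * k = n) = {n.sqrt} := by
        ext k
        simp only [Finset.mem_filter, Nat.mem_divisors, Finset.mem_singleton]
        constructor
        · rintro ⟨_, hkk⟩
          exact Nat.mul_self_inj.mp (by rw [hkk, hs])
        · rintro rfl
          exact ⟨⟨⟨n.sqrt, hs.symm⟩, hne⟩, hs⟩
      rw [this, Finset.card_singleton]
    · rw [if_neg hs]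
      have : n.divisors.filter (fun k => k * k = n) = ∅ := by
        apply Finset.filter_false_of_mem
        intro k _ hkk
        exact hs (by rw [show n.sqrt = k from by rw [← hkk, Nat.sqrt_eq]]; exact hkk)
      rw [this, Finset.card_empty]
  have hbij := card_large_eq_card_small n hn
  
  have hD1 : 1 ≤ n.divisors.card :=
    Finset.card_pos.mpr ⟨n, Nat.mem_divisors_self n hne⟩
  rw [h1, h2c]
  by_cases hs : n.sqrt * n.sqrt = n
  · rw [if_pos hs] at hEq ⊢; omega
  · rw [if_neg hs] at hEq ⊢; omega


lemma bool_finish (a s : ℕ) (ind : ℤ) (h : 2 * (s : ℤ) - ind = (a : ℤ) + 1) :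
    (if ((0 : ℤ) + (a : ℤ) == 4) = true then true else false)
      = ((2 * ((0 : ℤ) + (s : ℤ)) - ind) == 5) := by
  have heq : (((0 : ℤ) + (a : ℤ)) == 4) = ((2 * ((0 : ℤ) + (s : ℤ)) - ind) == 5) := by
    rw [Bool.eq_iff_iff]
    simp only [beq_iff_eq]
    omega
  rw [heq]
  cases h2 : ((2 * ((0 : ℤ) + (s : ℤ)) - ind) == 5) <;> simp

-- ===== VERDICT (by name: the statement is the Claim_ definition above) =====
theorem f_spec : Claim_equal_f := by
  intro x _
  unfold Spec_f f f_alt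
  by_cases hx : x < 1
  · simp [hx]
  · have hx1 : 1 ≤ x := by omega
    obtain ⟨n, rfl⟩ : ∃ n : ℕ, x = (n : Int) := ⟨x.toNat, by omega⟩
    have hn : 1 ≤ n := by exact_mod_cast hx1
    simp only [hx, if_false]
    have hb := b_loop_count n (n.sqrt + 1 - 1) 1 rfl le_rfl 0 false
    rw [show ((1:ℕ):ℤ) = (1:ℤ) by norm_num] at hb
    rw [a_loop_count n n 0, hb]
    have hsq1 : 1 ≤ n.sqrt := Nat.le_sqrt.mpr (by omega)
    have hcore := core_count n hn
    by_cases hps : n.sqrt * n.sqrt = n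
    · have hb2 : (false || decide (1 ≤ n.sqrt ∧ n.sqrt * n.sqrt = n)) = true := by
        simp [hsq1, hps]
      rw [hps, if_pos rfl] at hcore
      simp only [hb2, if_pos]
      exact bool_finish _ _ 1 (by omega)
    · have hb2 : (false || decide (1 ≤ n.sqrt ∧ n.sqrt * n.sqrt = n)) = false := by
        simp [hps]
      rw [if_neg hps] at hcore
      simp only [hb2, Bool.false_eq_true, if_false]
      exact bool_finish _ _ 0 (by omega)
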